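-- pv_equiv track=rewrite | github.com/jhkr1/baekjoon | 프로그래머스/0/181856. 배열 비교하기/배열 비교하기.py | solution
-- ===== SOURCE A (Python) =====
-- def solution(arr1, arr2):
--     if len(arr1) == len(arr2):
--         t1 = 0
--         t2 = 0
--         for i in arr1:
--             t1 += i
--         for j in arr2:
--             t2 += j
--         if t1 > t2:
--             return 1
--         elif t1 == t2:
--             return 0
--         else:
--             return -1
--
--     elif len(arr1) > len(arr2):
--         return 1
--     else:
--         return -1
-- ===== SOURCE B (Python) =====
-- def solution(arr1, arr2):
--     # One simultaneous scan: accumulate the element-wise difference; whichever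
--     # list has leftovers is longer and wins; equal lengths decide by the sign
--     # of the accumulated difference.
--     d = 0
--     i = 0
--     while i < len(arr1) and i < len(arr2):
--         d += arr1[i] - arr2[i]
--         i += 1
--     if i < len(arr1):
--         return 1
--     if i < len(arr2):
--         return -1
--     return (d > 0) - (d < 0)
-- ===== Notes on version B (the rewrite author's own statement) =====
-- stated objective: alternative
-- what changed: Replaces A's length branch plus two separate summing loops with a single simultaneous scan of both arrays that accumulates the element-wise difference d; whichever array still has leftovers after the joint scan is longer and decides immediately, otherwise the sign of d decides.
import Mathlib
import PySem

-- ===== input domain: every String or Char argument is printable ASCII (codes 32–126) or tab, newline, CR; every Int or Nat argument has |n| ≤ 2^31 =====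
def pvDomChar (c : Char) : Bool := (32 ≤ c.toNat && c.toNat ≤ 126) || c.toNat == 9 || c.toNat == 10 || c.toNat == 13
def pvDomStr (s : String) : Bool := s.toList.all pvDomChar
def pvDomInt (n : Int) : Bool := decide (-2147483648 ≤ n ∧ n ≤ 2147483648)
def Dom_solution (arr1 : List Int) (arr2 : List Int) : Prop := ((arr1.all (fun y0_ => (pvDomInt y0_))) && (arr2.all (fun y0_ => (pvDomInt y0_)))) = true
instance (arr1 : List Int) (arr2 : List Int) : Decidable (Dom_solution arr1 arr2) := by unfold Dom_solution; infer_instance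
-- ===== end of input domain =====

-- B replaces A's length branch + two summing loops by one simultaneous scan
-- accumulating the element-wise difference; leftovers decide, else sign of d (alternative).


-- ===== PORT A =====
def solution (arr1 : List Int) (arr2 : List Int) : Int :=
  if arr1.length = arr2.length then
    let t1 := arr1.foldl (fun t i => t + i) 0
    let t2 := arr2.foldl (fun t j => t + j) 0
    if t1 > t2 then 1
    else if t1 = t2 then 0
    else -1
  else if arr1.length > arr2.length then 1
  else -1

-- ===== PORT B =====
-- Source B's while loop over index i: recursion on the two suffixes, carrying d.
def solGo : List Int → List Int → Int → Int
  | x :: xs, y :: ys, d => solGo xs ys (d + x - y)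
  | _ :: _, [], _ => 1
  | [], _ :: _, _ => -1
  | [], [], d => (if d > 0 then (1 : Int) else 0) - (if d < 0 then 1 else 0)

def solution_alt (arr1 : List Int) (arr2 : List Int) : Int :=
  solGo arr1 arr2 0

-- ===== PRECONDITION & SPEC =====
def Spec_solution (arr1 : List Int) (arr2 : List Int) (out : Int) : Prop := out = solution_alt arr1 arr2
instance (arr1 : List Int) (arr2 : List Int) (out : Int) : Decidable (Spec_solution arr1 arr2 out) := by unfold Spec_solution; infer_instance

-- ===== CLAIM (what is proved, stated in full; the proofs are below) =====
def Claim_equal_solution : Prop := ∀ (arr1 : List Int) (arr2 : List Int), Dom_solution arr1 arr2 → Spec_solution arr1 arr2 (solution arr1 arr2)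

-- ===== LEMMAS AND PROOFS =====
theorem foldl_add_sum (xs : List Int) (a : Int) :
    xs.foldl (fun t i => t + i) a = a + xs.sum := by
  induction xs generalizing a with
  | nil => simp
  | cons x xs ih => simp [List.foldl, ih]; ring

-- Characterisation of B's scan: lengths first, then sign of d + sum xs - sum ys.
theorem solGo_eq (xs ys : List Int) (d : Int) :
    solGo xs ys d =
      if xs.length = ys.length then
        (if d + xs.sum - ys.sum > 0 then (1 : Int) else 0) -
        (if d + xs.sum - ys.sum < 0 then 1 else 0)
      else if xs.length > ys.length then 1 else -1 := by
  induction xs generalizing ys d with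
  | nil =>
    cases ys with
    | nil => simp [solGo]
    | cons y ys => simp [solGo]
  | cons x xs ih =>
    cases ys with
    | nil => simp [solGo]
    | cons y ys =>
      rw [solGo, ih]
      have : d + x - y + xs.sum - ys.sum = d + (x :: xs).sum - (y :: ys).sum := by
        simp; ring
      simp only [this, List.length_cons]
      by_cases h : xs.length = ys.length <;> simp [h]

-- ===== VERDICT (by name: the statement is the Claim_ definition above) =====
theorem solution_spec : Claim_equal_solution := by
  intro arr1 arr2 _
  unfold Spec_solution solution solution_alt
  rw [solGo_eq]
  simp only [foldl_add_sum, zero_add, zero_add]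
  by_cases h : arr1.length = arr2.length
  · simp only [h, if_pos]
    rcases lt_trichotomy arr1.sum arr2.sum with hs | hs | hs <;> simp [hs] <;> omega
  · simp [h]
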